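-- pv_equiv track=rewrite | github.com/nang518/Algorithm_YoungchaYoungcha | Python/Programmers/양과 늑대.py | solution
-- ===== SOURCE A (Python) =====
-- def solution(info, edges):
--     answer = []
--
--     visited = [0] * len(info)
--
--     def dfs(sheep, wolf):
--         if sheep > wolf:
--             answer.append(sheep)
--         else:
--             return
--
--         for p,c in edges:
--             if visited[p]:
--                 if not visited[c]:
--                     visited[c] = 1
--
--                     if info[c] == 0:
--                         dfs(sheep+1, wolf)
--                     else:
--                         dfs(sheep, wolf+1)
--
--                     visited[c] = 0
--
--     visited[0] = 1
--     dfs(1,0)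
--
--     return max(answer)
-- ===== SOURCE B (Python) =====
-- def solution(info, edges):
--     # Frontier DFS: precompute per-node lists of outgoing edge indices once, then
--     # carry the sorted frontier of available edge indices (plus a visited set and a
--     # running max) as recursion state instead of rescanning every edge each call.
--     n = len(info)
--     children = [[] for _ in range(n)]
--     for i, (p, c) in enumerate(edges):
--         children[p].append(i)
--     best = 0
--     visited = {0}
--
--     def dfs(sheep, wolf, frontier):
--         nonlocal best
--         if sheep <= wolf:
--             return
--         best = max(best, sheep)
--         for i in frontier:
--             c = edges[i][1]
--             visited.add(c)
--             nf = sorted([j for j in frontier if edges[j][1] != c]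
--                         + [j for j in children[c] if edges[j][1] not in visited])
--             if info[c] == 0:
--                 dfs(sheep + 1, wolf, nf)
--             else:
--                 dfs(sheep, wolf + 1, nf)
--             visited.discard(c)
--
--     dfs(1, 0, [i for i in children[0] if edges[i][1] not in visited])
--     return best
-- ===== Notes on version B (the rewrite author's own statement) =====
-- stated objective: alternative
-- what changed: B precomputes a per-node list of outgoing edge indices once and carries the sorted frontier of available edge indices (plus a visited set and a running max) as recursion state, instead of rescanning the whole edge list and a visited array at every call and taking max over an answer list; Pre_ restricts to the natural domain where every edge endpoint is a node index in [0, len(info)), outside which A raises IndexError or silently relies on Python negative-index wraparound.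
-- outside the precondition, e.g. on solution([0], [(-1, -1)]): A returns 1, B returns 2; on solution([0, 0], [(0, 1), (1, -2)]): A returns 2, B returns 3
import Mathlib
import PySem

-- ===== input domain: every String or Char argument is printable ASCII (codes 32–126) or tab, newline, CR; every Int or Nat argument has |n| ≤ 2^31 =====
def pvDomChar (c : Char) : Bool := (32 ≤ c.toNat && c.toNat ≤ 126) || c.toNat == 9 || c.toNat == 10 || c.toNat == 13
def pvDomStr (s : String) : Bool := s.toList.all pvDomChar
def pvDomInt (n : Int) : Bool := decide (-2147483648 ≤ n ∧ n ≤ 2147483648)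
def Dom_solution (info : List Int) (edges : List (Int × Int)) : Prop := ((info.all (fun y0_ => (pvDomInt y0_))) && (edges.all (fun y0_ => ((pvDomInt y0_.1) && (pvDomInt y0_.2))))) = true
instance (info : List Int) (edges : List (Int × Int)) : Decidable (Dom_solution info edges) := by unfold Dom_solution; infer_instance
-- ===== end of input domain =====

-- B maintains a frontier of available edge indices (precomputed child lists, visited set,
-- running max) as recursion state instead of rescanning all edges and an array each call;
-- objective: alternative. Equivalence is about the return value.


-- ===== PORT A =====
-- Python's visited[i] reads/writes are ported with pyGetD/pySetD (negative-index wrap);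
-- indices where Python raises IndexError are excluded by Pre_solution.
-- The recursion's fuel (info.length + 1) bounds the depth: each nested call marks a
-- fresh node visited, so the depth never exceeds the number of nodes.
def solutionDfs (info : List Int) (edges : List (Int × Int)) :
    Nat → Int → Int → List Int × List Int → List Int × List Int
  | 0, _, _, st => st
  | fuel+1, sheep, wolf, st =>
    if sheep > wolf then
      edges.foldl
        (fun st pc =>
          if PySem.List.pyGetD st.1 pc.1 0 ≠ 0 then
            if PySem.List.pyGetD st.1 pc.2 0 = 0 then
              let st2 :=
                if PySem.List.pyGetD info pc.2 0 = 0 then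
                  solutionDfs info edges fuel (sheep+1) wolf (PySem.List.pySetD st.1 pc.2 1, st.2)
                else
                  solutionDfs info edges fuel sheep (wolf+1) (PySem.List.pySetD st.1 pc.2 1, st.2)
              (PySem.List.pySetD st2.1 pc.2 0, st2.2)
            else st
          else st)
        (st.1, st.2 ++ [sheep])
    else st

def solution (info : List Int) (edges : List (Int × Int)) : Int :=
  let visited := PySem.List.pySetD (List.replicate info.length (0 : Int)) 0 1
  let st := solutionDfs info edges (info.length + 1) 1 0 (visited, [])
  ((PySem.List.max? st.2 (fun x => x)).getD 0)

-- ===== PORT B =====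
-- children[p].append(i) over enumerate(edges), ported with pyGetD/pySetD
def altChildren (info : List Int) (edges : List (Int × Int)) : List (List Int) :=
  (PySem.List.enumerate edges 0).foldl
    (fun ch ie =>
      PySem.List.pySetD ch ie.2.1 (PySem.List.pyGetD ch ie.2.1 [] ++ [ie.1]))
    (List.replicate info.length [])

-- frontier = sorted list of currently-available edge indices; visited = set of
-- visited nodes; best = running max (fuel is the same depth guard as A's)
def altDfs (info : List Int) (edges : List (Int × Int)) (children : List (List Int)) :
    Nat → Int → Int → List Int → PySem.Set Int → Int → Int
  | 0, _, _, _, _, best => best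
  | fuel+1, sheep, wolf, frontier, visited, best =>
    if sheep ≤ wolf then best
    else
      frontier.foldl
        (fun best i =>
          let c := (PySem.List.pyGetD edges i (0, 0)).2
          let visited' := PySem.Set.add visited c
          let nf := PySem.List.sorted
            (frontier.filter (fun j => !((PySem.List.pyGetD edges j (0, 0)).2 == c))
              ++ (PySem.List.pyGetD children c []).filter (fun j =>
                    !(PySem.Set.contains visited' (PySem.List.pyGetD edges j (0, 0)).2)))
            (fun x => x)
          if PySem.List.pyGetD info c 0 = 0 then
            altDfs info edges children fuel (sheep+1) wolf nf visited' best
          else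
            altDfs info edges children fuel sheep (wolf+1) nf visited' best)
        (max best sheep)

def solution_alt (info : List Int) (edges : List (Int × Int)) : Int :=
  let children := altChildren info edges
  let visited : PySem.Set Int := PySem.Set.ofList [0]
  let init := (PySem.List.pyGetD children 0 []).filter (fun i =>
    !(PySem.Set.contains visited (PySem.List.pyGetD edges i (0, 0)).2))
  altDfs info edges children (info.length + 1) 1 0 init visited 0

-- ===== PRECONDITION & SPEC =====
-- PtsL edges = the node ids mentioned by the input: the root 0 and every edge endpoint.
def PtsL (edges : List (Int × Int)) : List Int :=
  0 :: edges.flatMap (fun pc => [pc.1, pc.2])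

-- Pre_ restricts to the natural inputs: info nonempty, every edge endpoint a valid index
-- (Python raises IndexError beyond [-n, n)), and no two distinct endpoint values naming
-- the same node through Python's negative-index wraparound — on such aliased inputs any
-- agreement between a visited ARRAY (A) and a visited SET of raw ids (B) is accidental.
def Pre_solution (info : List Int) (edges : List (Int × Int)) : Prop :=
  info ≠ [] ∧
  (∀ x ∈ PtsL edges, -(info.length : Int) ≤ x ∧ x < info.length) ∧
  (∀ x ∈ PtsL edges, ∀ y ∈ PtsL edges,
    PySem.Int.mod x info.length = PySem.Int.mod y info.length → x = y)
instance (info : List Int) (edges : List (Int × Int)) : Decidable (Pre_solution info edges) := by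
  unfold Pre_solution; infer_instance

def pvWitness_solution : List Int × (List (Int × Int)) :=
  ([0, 0, 1, 0], [(0, 1), (1, 2), (0, 3)])

def Spec_solution (info : List Int) (edges : List (Int × Int)) (out : Int) : Prop := out = solution_alt info edges
instance (info : List Int) (edges : List (Int × Int)) (out : Int) : Decidable (Spec_solution info edges out) := by unfold Spec_solution; infer_instance

-- ===== CLAIM (what is proved, stated in full; the proofs are below) =====
def Claim_equal_solution : Prop := ∀ (info : List Int) (edges : List (Int × Int)), Dom_solution info edges → Pre_solution info edges → Spec_solution info edges (solution info edges)

-- ===== LEMMAS AND PROOFS =====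

-- The common exploration trace: the sequence of sheep-counts both programs record.
def traceT (info : List Int) (edges : List (Int × Int)) :
    Nat → Int → Int → List Int → List Int
  | 0, _, _, _ => []
  | fuel+1, s, w, v =>
    if s > w then
      s :: edges.flatMap (fun pc =>
        if PySem.List.pyGetD v pc.1 0 ≠ 0 then
          if PySem.List.pyGetD v pc.2 0 = 0 then
            if PySem.List.pyGetD info pc.2 0 = 0 then
              traceT info edges fuel (s+1) w (PySem.List.pySetD v pc.2 1)
            else traceT info edges fuel s (w+1) (PySem.List.pySetD v pc.2 1)
          else []
        else [])
    else []

def candb (info : List Int) (edges : List (Int × Int)) (v : List Int) (i : Int) : Bool :=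
  (PySem.List.pyGetD v (PySem.List.pyGetD edges i ((0 : Int), (0 : Int))).1 0 != 0) &&
  (PySem.List.pyGetD v (PySem.List.pyGetD edges i ((0 : Int), (0 : Int))).2 0 == 0)

def frontOf (info : List Int) (edges : List (Int × Int)) (v : List Int) : List Int :=
  (PySem.List.pyRange 0 edges.length 1).filter (candb info edges v)

lemma zero_mem_pts (edges : List (Int × Int)) : (0 : Int) ∈ PtsL edges := by
  simp [PtsL]

lemma fst_mem_pts (edges : List (Int × Int)) {pc : Int × Int} (h : pc ∈ edges) :
    pc.1 ∈ PtsL edges := by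
  simp only [PtsL, List.mem_cons, List.mem_flatMap]
  exact Or.inr ⟨pc, h, by simp⟩

lemma snd_mem_pts (edges : List (Int × Int)) {pc : Int × Int} (h : pc ∈ edges) :
    pc.2 ∈ PtsL edges := by
  simp only [PtsL, List.mem_cons, List.mem_flatMap]
  exact Or.inr ⟨pc, h, by simp⟩

lemma pyIdx_norm (n : Nat) (i : Int) (h1 : -(n : Int) ≤ i) (h2 : i < n) :
    PySem.List.pyIdx? n i = some (PySem.Int.mod i n).toNat := by
  have hn : 0 < n := by omega
  have hm : PySem.Int.mod i n = i % (n : Int) := PySem.Int.mod_eq_emod_of_pos (by exact_mod_cast hn)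
  unfold PySem.List.pyIdx?
  by_cases h0 : 0 ≤ i
  · have : i % (n : Int) = i := Int.emod_eq_of_lt h0 h2
    simp [h0, h2, hm, this]
  · have hlt : i < 0 := by omega
    have : i % (n : Int) = i + n := by
      have h3 : (i + n) % (n : Int) = i % n := by simp
      have h4 : (i + n) % (n : Int) = i + n := Int.emod_eq_of_lt (by omega) (by omega)
      omega
    simp only [hm, this]
    simp [h0, h1]
    omega

lemma pyGetD_norm {α : Type} (xs : List α) (i : Int) (d : α)
    (h1 : -(xs.length : Int) ≤ i) (h2 : i < xs.length) :
    PySem.List.pyGetD xs i d = xs.getD (PySem.Int.mod i xs.length).toNat d := by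
  have hk : (PySem.Int.mod i xs.length).toNat < xs.length := by
    have hn : 0 < xs.length := by omega
    have h := PySem.Int.mod_lt i (b := (xs.length : Int)) (by exact_mod_cast hn)
    have h' := PySem.Int.mod_nonneg i (b := (xs.length : Int)) (by exact_mod_cast hn)
    omega
  simp [PySem.List.pyGetD, PySem.List.pyGet?, pyIdx_norm _ _ h1 h2, List.getD, List.getElem?_eq_getElem hk]

lemma pySetD_norm {α : Type} (xs : List α) (i : Int) (v : α)
    (h1 : -(xs.length : Int) ≤ i) (h2 : i < xs.length) :
    PySem.List.pySetD xs i v = xs.set (PySem.Int.mod i xs.length).toNat v := by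
  simp [PySem.List.pySetD, PySem.List.pySet?, pyIdx_norm _ _ h1 h2]

lemma set_cancel (v : List Int) (c : Int) (h : PySem.List.pyGetD v c 0 = 0) :
    PySem.List.pySetD (PySem.List.pySetD v c 1) c 0 = v := by
  by_cases hr : -(v.length : Int) ≤ c ∧ c < v.length
  · obtain ⟨h1, h2⟩ := hr
    have hk : (PySem.Int.mod c v.length).toNat < v.length := by
      have hn : (0:Int) < v.length := by omega
      have := PySem.Int.mod_lt c (b := (v.length : Int)) hn
      have := PySem.Int.mod_nonneg c (b := (v.length : Int)) hn
      omega
    rw [pySetD_norm _ _ _ h1 h2]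
    rw [pySetD_norm _ _ _ (by simpa using h1) (by simpa using h2)]
    rw [pyGetD_norm _ _ _ h1 h2] at h
    simp only [List.length_set]
    rw [List.set_set]
    rw [List.getD_eq_getElem _ _ hk] at h
    rw [← h]
    exact List.set_getElem_self hk
  · have hnone : PySem.List.pyIdx? v.length c = none := by
      unfold PySem.List.pyIdx?
      rcases not_and_or.mp hr with h' | h' <;> split_ifs <;> first | rfl | omega
    simp [PySem.List.pySetD, PySem.List.pySet?, hnone]

lemma mod_bounds (N : Int) (x : Int) (hN : 0 < N) :
    0 ≤ PySem.Int.mod x N ∧ PySem.Int.mod x N < N :=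
  ⟨PySem.Int.mod_nonneg _ hN, PySem.Int.mod_lt _ hN⟩

lemma pyGetD_pySetD_mod (v : List Int) (c x y : Int)
    (hc1 : -(v.length : Int) ≤ c) (hc2 : c < v.length)
    (hx1 : -(v.length : Int) ≤ x) (hx2 : x < v.length) :
    PySem.List.pyGetD (PySem.List.pySetD v c y) x 0 =
      if PySem.Int.mod x v.length = PySem.Int.mod c v.length then y
      else PySem.List.pyGetD v x 0 := by
  have hn : 0 < v.length := by omega
  have hcb := mod_bounds v.length c (by exact_mod_cast hn)
  have hxb := mod_bounds v.length x (by exact_mod_cast hn)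
  rw [pySetD_norm _ _ _ hc1 hc2]
  rw [pyGetD_norm _ _ _ (by simpa using hx1) (by simpa using hx2)]
  rw [pyGetD_norm _ _ _ hx1 hx2]
  simp only [List.length_set]
  by_cases h : PySem.Int.mod x (v.length : Int) = PySem.Int.mod c (v.length : Int)
  · rw [if_pos h, h]
    rw [List.getD_eq_getElem?_getD, List.getElem?_set_self (by omega)]
    simp
  · rw [if_neg h]
    rw [List.getD_eq_getElem?_getD, List.getElem?_set_ne (by omega), ← List.getD_eq_getElem?_getD]

-- getD after setD, when the two indices cannot alias (mod-equality iff equality)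
lemma getset (v : List Int) (c x y : Int)
    (hc1 : -(v.length : Int) ≤ c) (hc2 : c < v.length)
    (hx1 : -(v.length : Int) ≤ x) (hx2 : x < v.length)
    (hmc : PySem.Int.mod x v.length = PySem.Int.mod c v.length ↔ x = c) :
    PySem.List.pyGetD (PySem.List.pySetD v c y) x 0 =
      if x = c then y else PySem.List.pyGetD v x 0 := by
  rw [pyGetD_pySetD_mod v c x y hc1 hc2 hx1 hx2]
  by_cases h : x = c
  · rw [if_pos (hmc.mpr h), if_pos h]
  · rw [if_neg (fun hm => h (hmc.mp hm)), if_neg h]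

lemma dfsA_eq_trace (info : List Int) (edges : List (Int × Int)) :
    ∀ (fuel : Nat) (s w : Int) (v ans : List Int),
      solutionDfs info edges fuel s w (v, ans) = (v, ans ++ traceT info edges fuel s w v) := by
  intro fuel
  induction fuel with
  | zero => intro s w v ans; simp [solutionDfs, traceT]
  | succ fuel IH =>
    intro s w v ans
    by_cases hsw : s > w
    · rw [solutionDfs, traceT]
      simp only [if_pos hsw]
      have aux : ∀ (es : List (Int × Int)) (ans : List Int),
          es.foldl
            (fun st pc =>
              if PySem.List.pyGetD st.1 pc.1 0 ≠ 0 then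
                if PySem.List.pyGetD st.1 pc.2 0 = 0 then
                  let st2 :=
                    if PySem.List.pyGetD info pc.2 0 = 0 then
                      solutionDfs info edges fuel (s+1) w (PySem.List.pySetD st.1 pc.2 1, st.2)
                    else
                      solutionDfs info edges fuel s (w+1) (PySem.List.pySetD st.1 pc.2 1, st.2)
                  (PySem.List.pySetD st2.1 pc.2 0, st2.2)
                else st
              else st) (v, ans)
          = (v, ans ++ es.flatMap (fun pc =>
              if PySem.List.pyGetD v pc.1 0 ≠ 0 then
                if PySem.List.pyGetD v pc.2 0 = 0 then
                  if PySem.List.pyGetD info pc.2 0 = 0 then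
                    traceT info edges fuel (s+1) w (PySem.List.pySetD v pc.2 1)
                  else traceT info edges fuel s (w+1) (PySem.List.pySetD v pc.2 1)
                else []
              else [])) := by
        intro es
        induction es with
        | nil => intro ans; simp
        | cons pc es ihes =>
          intro ans
          rw [List.foldl_cons, List.flatMap_cons]
          have hstep :
              (if PySem.List.pyGetD (v, ans).1 pc.1 0 ≠ 0 then
                if PySem.List.pyGetD (v, ans).1 pc.2 0 = 0 then
                  let st2 :=
                    if PySem.List.pyGetD info pc.2 0 = 0 then
                      solutionDfs info edges fuel (s + 1) w (PySem.List.pySetD (v, ans).1 pc.2 1, (v, ans).2)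
                    else solutionDfs info edges fuel s (w + 1) (PySem.List.pySetD (v, ans).1 pc.2 1, (v, ans).2)
                  (PySem.List.pySetD st2.1 pc.2 0, st2.2)
                else (v, ans)
              else (v, ans))
              = (v, ans ++ (if PySem.List.pyGetD v pc.1 0 ≠ 0 then
                  if PySem.List.pyGetD v pc.2 0 = 0 then
                    if PySem.List.pyGetD info pc.2 0 = 0 then
                      traceT info edges fuel (s+1) w (PySem.List.pySetD v pc.2 1)
                    else traceT info edges fuel s (w+1) (PySem.List.pySetD v pc.2 1)
                  else []
                else [])) := by
            dsimp only
            split_ifs with hp hc hi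
            · rw [IH, set_cancel v pc.2 hc]
            · rw [IH, set_cancel v pc.2 hc]
            · simp
            · simp
          rw [hstep, ihes, List.append_assoc]
      rw [aux]
      simp
    · rw [solutionDfs, traceT]
      simp [if_neg hsw]

lemma children_fold (info : List Int) (hn : 0 < info.length) :
    ∀ (es : List (Int × Int)),
      (∀ pc ∈ es, -(info.length : Int) ≤ pc.1 ∧ pc.1 < info.length) →
      ∀ (k : Int) (ch : List (List Int)), ch.length = info.length →
      (((PySem.List.enumerate es k).foldl
        (fun ch ie =>
          PySem.List.pySetD ch ie.2.1 (PySem.List.pyGetD ch ie.2.1 [] ++ [ie.1])) ch).length = info.length ∧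
      ∀ u : Nat, u < info.length →
        ((PySem.List.enumerate es k).foldl
          (fun ch ie =>
            PySem.List.pySetD ch ie.2.1 (PySem.List.pyGetD ch ie.2.1 [] ++ [ie.1])) ch).getD u []
        = ch.getD u [] ++
          ((PySem.List.enumerate es k).filter
            (fun ie => PySem.Int.mod ie.2.1 info.length == (u : Int))).map (·.1)) := by
  intro es
  induction es with
  | nil => intro _ k ch hch; simp [PySem.List.enumerate_nil, hch]
  | cons x es ihes =>
    intro hb k ch hch
    have hx := hb x (by simp)
    have ihes' := ihes (fun pc hpc => hb pc (by simp [hpc]))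
    rw [PySem.List.enumerate_cons]
    set n := info.length with hndef
    have hmnn : 0 ≤ PySem.Int.mod x.1 n := PySem.Int.mod_nonneg _ (by exact_mod_cast hn)
    have hmlt : PySem.Int.mod x.1 n < (n : Int) := PySem.Int.mod_lt _ (by exact_mod_cast hn)
    set t : Nat := (PySem.Int.mod x.1 n).toNat with htdef
    have htn : t < n := by omega
    have hcast : PySem.Int.mod x.1 n = ((t : Nat) : Int) := by omega
    have hset : PySem.List.pySetD ch x.1 (PySem.List.pyGetD ch x.1 [] ++ [k])
        = ch.set t (ch.getD t [] ++ [k]) := by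
      rw [pySetD_norm _ _ _ (by omega) (by omega), pyGetD_norm _ _ _ (by omega) (by omega), hch, hcast]
      simp
    rw [List.foldl_cons]
    dsimp only
    rw [hset]
    obtain ⟨hl, hg⟩ := ihes' (k+1) (ch.set t (ch.getD t [] ++ [k])) (by simpa using hch)
    refine ⟨hl, ?_⟩
    intro u hu
    rw [hg u hu, List.filter_cons]
    by_cases hut : u = t
    · have hbeq : (PySem.Int.mod x.1 (n : Int) == (u : Int)) = true := by
        rw [hcast, hut]; simp
      rw [if_pos hbeq]
      have hgd : (ch.set t (ch.getD t [] ++ [k])).getD u [] = ch.getD u [] ++ [k] := by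
        have hlt : t < ch.length := by omega
        rw [hut, List.getD_eq_getElem?_getD, List.getElem?_set_self hlt, List.getD_eq_getElem?_getD]
        simp
      rw [hgd]
      simp
    · have hbeq : (PySem.Int.mod x.1 (n : Int) == (u : Int)) = false := by
        rw [hcast]; simp; omega
      rw [if_neg (by simp [hbeq])]
      have hgd : (ch.set t (ch.getD t [] ++ [k])).getD u [] = ch.getD u [] := by
        rw [List.getD_eq_getElem?_getD, List.getElem?_set_ne (by omega), List.getD_eq_getElem?_getD]
      rw [hgd]

-- children lookup at id c: all edge indices whose parent equals c (no aliasing)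
lemma children_spec (info : List Int) (edges : List (Int × Int))
    (hn : 0 < info.length)
    (hb : ∀ x ∈ PtsL edges, -(info.length : Int) ≤ x ∧ x < info.length)
    (hinj : ∀ x ∈ PtsL edges, ∀ y ∈ PtsL edges,
      PySem.Int.mod x info.length = PySem.Int.mod y info.length → x = y)
    (c : Int) (hcp : c ∈ PtsL edges) :
    PySem.List.pyGetD (altChildren info edges) c [] =
      (PySem.List.pyRange 0 edges.length 1).filter
        (fun i => (PySem.List.pyGetD edges i ((0:Int),(0:Int))).1 == c) := by
  obtain ⟨hc1, hc2⟩ := hb c hcp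
  have hN : (0:Int) < info.length := by exact_mod_cast hn
  have hcb := mod_bounds (info.length : Int) c hN
  obtain ⟨hl, hg⟩ := children_fold info hn edges
    (fun pc hpc => hb pc.1 (fst_mem_pts edges hpc)) 0 (List.replicate info.length []) (by simp)
  unfold altChildren
  rw [pyGetD_norm _ _ _ (by rw [hl]; exact hc1) (by rw [hl]; exact hc2), hl]
  rw [hg (PySem.Int.mod c info.length).toNat (by omega)]
  rw [PySem.List.enumerate_eq_map_pyRange edges ((0:Int),(0:Int)), List.filter_map, List.map_map]
  simp only [Function.comp_def]
  have hrep : (List.replicate info.length ([] : List Int)).getD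
      (PySem.Int.mod c (info.length : Int)).toNat [] = [] := by
    rw [List.getD_eq_getElem?_getD, List.getElem?_replicate]
    split_ifs <;> rfl
  rw [hrep, List.nil_append, List.map_id']
  refine List.filter_congr ?_
  intro j hj
  rw [PySem.List.mem_pyRange_one] at hj
  rw [PySem.List.len_eq] at hj
  have hedge : PySem.List.pyGetD edges j ((0:Int),(0:Int)) = edges[j.toNat]'(by omega) :=
    PySem.List.pyGetD_eq_getElem edges _ hj.1 hj.2
  have hmem : PySem.List.pyGetD edges j ((0:Int),(0:Int)) ∈ edges := by
    rw [hedge]; exact List.getElem_mem _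
  have hpp := fst_mem_pts edges hmem
  have hcast : (((PySem.Int.mod c info.length).toNat : Nat) : Int) = PySem.Int.mod c info.length := by
    omega
  rw [Bool.eq_iff_iff, beq_iff_eq, beq_iff_eq, hcast]
  constructor
  · intro h
    exact hinj _ hpp _ hcp h
  · intro h
    rw [h]

lemma filter_or_perm {α : Type} (l : List α) (p q : α → Bool)
    (h : ∀ x ∈ l, ¬(p x = true ∧ q x = true)) :
    ((l.filter p ++ l.filter q)).Perm (l.filter (fun x => p x || q x)) := by
  induction l with
  | nil => simp
  | cons x l ih =>
    have hx := h x (by simp)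
    have ih' := ih (fun y hy => h y (by simp [hy]))
    by_cases hp : p x = true
    · have hq : q x = false := by rcases Bool.eq_false_or_eq_true (q x) with h' | h' <;> tauto
      simp only [List.filter_cons, hp, hq]
      simpa using ih'.cons x
    · have hp' : p x = false := by rcases Bool.eq_false_or_eq_true (p x) with h' | h' <;> tauto
      by_cases hq : q x = true
      · simp only [List.filter_cons, hp', hq, Bool.false_or]
        simp only [if_true, Bool.false_eq_true, if_false]
        exact List.perm_middle.trans (ih'.cons x)
      · have hq' : q x = false := by rcases Bool.eq_false_or_eq_true (q x) with h' | h' <;> tauto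
        simp only [List.filter_cons, hp', hq', Bool.false_or, Bool.false_eq_true, if_false]
        exact ih'

lemma flatMap_if_filter {α β : Type} (l : List α) (p : α → Bool) (h : α → List β) :
    (l.flatMap (fun x => if p x then h x else [])) = (l.filter p).flatMap h := by
  induction l with
  | nil => simp
  | cons x l ih =>
    rw [List.flatMap_cons, List.filter_cons]
    by_cases hp : p x = true
    · rw [if_pos hp, if_pos hp, List.flatMap_cons, ih]
    · rw [if_neg hp, if_neg (by simp [hp]), ih]; simp

lemma foldl_max_flatMap {α : Type} (l : List α) (h : α → List Int) (acc : Int) :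
    (l.flatMap h).foldl max acc = l.foldl (fun b x => (h x).foldl max b) acc := by
  induction l generalizing acc with
  | nil => simp
  | cons x l ih => rw [List.flatMap_cons, List.foldl_append, List.foldl_cons, ih]

-- the visited-set invariant: members are mentioned ids, and on mentioned ids the set
-- agrees with A's visited array
def VisInv (info : List Int) (edges : List (Int × Int)) (v : List Int)
    (visS : PySem.Set Int) : Prop :=
  (∀ u : Int, visS.contains u = true → u ∈ PtsL edges) ∧
  (∀ u ∈ PtsL edges, (visS.contains u = true ↔ PySem.List.pyGetD v u 0 ≠ 0))

lemma vis_step (info : List Int) (edges : List (Int × Int))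
    (hb : ∀ x ∈ PtsL edges, -(info.length : Int) ≤ x ∧ x < info.length)
    (hinj : ∀ x ∈ PtsL edges, ∀ y ∈ PtsL edges,
      PySem.Int.mod x info.length = PySem.Int.mod y info.length → x = y)
    (v : List Int) (hv : v.length = info.length)
    (visS : PySem.Set Int) (hvis : VisInv info edges v visS)
    (c : Int) (hcp : c ∈ PtsL edges) :
    VisInv info edges (PySem.List.pySetD v c 1) (PySem.Set.add visS c) := by
  obtain ⟨hvA, hvB⟩ := hvis
  obtain ⟨hc1, hc2⟩ := hb c hcp
  constructor
  · intro u hu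
    rw [PySem.Set.contains_iff, PySem.Set.mem_add] at hu
    rcases hu with hu | hu
    · exact hvA u ((PySem.Set.contains_iff _ _).mpr hu)
    · rw [hu]; exact hcp
  · intro u hup
    obtain ⟨hu1, hu2⟩ := hb u hup
    have hmc : PySem.Int.mod u v.length = PySem.Int.mod c v.length ↔ u = c := by
      rw [hv]
      exact ⟨fun h => hinj _ hup _ hcp h, fun h => by rw [h]⟩
    have hgs := getset v c u 1 (by omega) (by omega) (by omega) (by omega) hmc
    rw [PySem.Set.contains_iff, PySem.Set.mem_add, hgs]
    by_cases huc : u = c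
    · simp [huc]
    · rw [if_neg huc]
      rw [← PySem.Set.contains_iff, hvB u hup]
      constructor
      · rintro (h | h)
        · exact h
        · exact absurd h huc
      · exact Or.inl

lemma cand_step (info : List Int) (edges : List (Int × Int))
    (hb : ∀ x ∈ PtsL edges, -(info.length : Int) ≤ x ∧ x < info.length)
    (hinj : ∀ x ∈ PtsL edges, ∀ y ∈ PtsL edges,
      PySem.Int.mod x info.length = PySem.Int.mod y info.length → x = y)
    (v : List Int) (hv : v.length = info.length)
    (visS : PySem.Set Int) (hvis : VisInv info edges v visS)
    (c : Int) (hcp : c ∈ PtsL edges)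
    (hvc : PySem.List.pyGetD v c 0 = 0) :
    ∀ j ∈ PySem.List.pyRange 0 edges.length 1,
      (((candb info edges v j && !((PySem.List.pyGetD edges j ((0:Int),(0:Int))).2 == c)) ||
        (((PySem.List.pyGetD edges j ((0:Int),(0:Int))).1 == c) &&
          !(PySem.Set.contains (PySem.Set.add visS c)
              (PySem.List.pyGetD edges j ((0:Int),(0:Int))).2)))
        = candb info edges (PySem.List.pySetD v c 1) j)
      ∧ ¬(((candb info edges v j && !((PySem.List.pyGetD edges j ((0:Int),(0:Int))).2 == c)) = true) ∧
          ((((PySem.List.pyGetD edges j ((0:Int),(0:Int))).1 == c) &&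
          !(PySem.Set.contains (PySem.Set.add visS c)
              (PySem.List.pyGetD edges j ((0:Int),(0:Int))).2)) = true)) := by
  intro j hj
  rw [PySem.List.mem_pyRange_one] at hj
  have hedge : PySem.List.pyGetD edges j ((0:Int),(0:Int)) = edges[j.toNat]'(by omega) :=
    PySem.List.pyGetD_eq_getElem edges _ hj.1 hj.2
  have hmem : PySem.List.pyGetD edges j ((0:Int),(0:Int)) ∈ edges := by
    rw [hedge]; exact List.getElem_mem _
  obtain ⟨hc1, hc2⟩ := hb c hcp
  set pj := (PySem.List.pyGetD edges j ((0:Int),(0:Int))).1 with hpj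
  set cj := (PySem.List.pyGetD edges j ((0:Int),(0:Int))).2 with hcj
  have hpp : pj ∈ PtsL edges := fst_mem_pts edges hmem
  have hqp : cj ∈ PtsL edges := snd_mem_pts edges hmem
  obtain ⟨hp1, hp2⟩ := hb pj hpp
  obtain ⟨hq1, hq2⟩ := hb cj hqp
  have hmp : PySem.Int.mod pj v.length = PySem.Int.mod c v.length ↔ pj = c := by
    rw [hv]; exact ⟨fun h => hinj _ hpp _ hcp h, fun h => by rw [h]⟩
  have hmq : PySem.Int.mod cj v.length = PySem.Int.mod c v.length ↔ cj = c := by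
    rw [hv]; exact ⟨fun h => hinj _ hqp _ hcp h, fun h => by rw [h]⟩
  have hsp := getset v c pj 1 (by omega) (by omega) (by omega) (by omega) hmp
  have hsc := getset v c cj 1 (by omega) (by omega) (by omega) (by omega) hmq
  have hcont := (vis_step info edges hb hinj v hv visS hvis c hcp).2 cj hqp
  have hpza : pj = c → PySem.List.pyGetD v pj 0 = 0 := by
    intro h; rw [h]; exact hvc
  constructor
  · rw [Bool.eq_iff_iff]
    simp only [Bool.or_eq_true, Bool.and_eq_true, Bool.not_eq_true', beq_eq_false_iff_ne, beq_iff_eq,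
      candb, bne_iff_ne, ne_eq, ← hpj, ← hcj, hsp, hsc]
    rw [← Bool.not_eq_true, hcont]
    by_cases hPc : pj = c <;> by_cases hCc : cj = c
    · have honec : PySem.List.pyGetD (PySem.List.pySetD v c 1) c 0 = 1 :=
        hCc ▸ (by rw [hsc, if_pos hCc] :
          PySem.List.pyGetD (PySem.List.pySetD v c 1) cj 0 = 1)
      simp [hPc, hCc, honec]
    · have hz := hpza hPc
      have hne : PySem.List.pyGetD (PySem.List.pySetD v c 1) cj 0
          = PySem.List.pyGetD v cj 0 := by rw [hsc, if_neg hCc]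
      simp [hPc, hCc, hne]
    · have honec : PySem.List.pyGetD (PySem.List.pySetD v c 1) c 0 = 1 :=
        hCc ▸ (by rw [hsc, if_pos hCc] :
          PySem.List.pyGetD (PySem.List.pySetD v c 1) cj 0 = 1)
      simp [hPc, hCc, honec]
    · have hne : PySem.List.pyGetD (PySem.List.pySetD v c 1) cj 0
          = PySem.List.pyGetD v cj 0 := by rw [hsc, if_neg hCc]
      simp [hPc, hCc, hne]
  · rintro ⟨h1, h2⟩
    simp only [Bool.and_eq_true, Bool.not_eq_true', beq_eq_false_iff_ne, beq_iff_eq,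
      candb, bne_iff_ne, ne_eq, ← hpj, ← hcj] at h1 h2
    exact h1.1.1 (hpza h2.1)

lemma frontier_step (info : List Int) (edges : List (Int × Int))
    (hn : 0 < info.length)
    (hb : ∀ x ∈ PtsL edges, -(info.length : Int) ≤ x ∧ x < info.length)
    (hinj : ∀ x ∈ PtsL edges, ∀ y ∈ PtsL edges,
      PySem.Int.mod x info.length = PySem.Int.mod y info.length → x = y)
    (v : List Int) (hv : v.length = info.length)
    (visS : PySem.Set Int) (hvis : VisInv info edges v visS)
    (c : Int) (hcp : c ∈ PtsL edges)
    (hvc : PySem.List.pyGetD v c 0 = 0) :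
    PySem.List.sorted
      ((frontOf info edges v).filter (fun j =>
          !((PySem.List.pyGetD edges j ((0:Int),(0:Int))).2 == c))
       ++ (PySem.List.pyGetD (altChildren info edges) c []).filter
            (fun j => !(PySem.Set.contains (PySem.Set.add visS c)
                (PySem.List.pyGetD edges j ((0:Int),(0:Int))).2)))
      (fun x => x)
    = frontOf info edges (PySem.List.pySetD v c 1) := by
  rw [children_spec info edges hn hb hinj c hcp]
  unfold frontOf
  rw [List.filter_filter, List.filter_filter]
  have hpt := cand_step info edges hb hinj v hv visS hvis c hcp hvc
  apply PySem.List.sorted_eq_of_perm_of_pairwise_lt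
  · have hcg : (PySem.List.pyRange 0 edges.length 1).filter (candb info edges (PySem.List.pySetD v c 1))
        = (PySem.List.pyRange 0 edges.length 1).filter (fun j =>
            ((!((PySem.List.pyGetD edges j ((0:Int),(0:Int))).2 == c)) && candb info edges v j) ||
            ((!(PySem.Set.contains (PySem.Set.add visS c)
                (PySem.List.pyGetD edges j ((0:Int),(0:Int))).2))
              && ((PySem.List.pyGetD edges j ((0:Int),(0:Int))).1 == c))) := by
      refine List.filter_congr (fun j hj => ?_)
      rw [← (hpt j hj).1]
      simp only [Bool.and_comm]
    rw [hcg]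
    refine (filter_or_perm _ _ _ ?_).symm
    intro j hj
    rintro ⟨h1, h2⟩
    refine (hpt j hj).2 ⟨?_, ?_⟩
    · rw [Bool.and_comm]; exact h1
    · rw [Bool.and_comm]; exact h2
  · exact (PySem.List.pairwise_lt_pyRange_one 0 edges.length).filter _

lemma flatMap_eq_pyRange {α β : Type} (xs : List α) (d : α) (g : α → List β) :
    xs.flatMap g = (PySem.List.pyRange 0 xs.length 1).flatMap
      (fun i => g (PySem.List.pyGetD xs i d)) := by
  conv_lhs => rw [← PySem.List.map_pyGetD_pyRange_zero' xs d]
  rw [List.flatMap_map]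

lemma dfsB_eq_foldl_trace (info : List Int) (edges : List (Int × Int))
    (hn : 0 < info.length)
    (hb : ∀ x ∈ PtsL edges, -(info.length : Int) ≤ x ∧ x < info.length)
    (hinj : ∀ x ∈ PtsL edges, ∀ y ∈ PtsL edges,
      PySem.Int.mod x info.length = PySem.Int.mod y info.length → x = y) :
    ∀ (fuel : Nat) (s w : Int) (v : List Int) (visS : PySem.Set Int) (best : Int),
      v.length = info.length →
      VisInv info edges v visS →
      altDfs info edges (altChildren info edges) fuel s w (frontOf info edges v) visS best
        = (traceT info edges fuel s w v).foldl max best := by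
  intro fuel
  induction fuel with
  | zero =>
    intro s w v visS best hv hvis
    simp [altDfs, traceT]
  | succ fuel IH =>
    intro s w v visS best hv hvis
    simp only [altDfs, traceT]
    by_cases hsw : s > w
    · rw [if_neg (by omega), if_pos hsw, List.foldl_cons]
      have hflat :
          edges.flatMap (fun pc =>
            if PySem.List.pyGetD v pc.1 0 ≠ 0 then
              if PySem.List.pyGetD v pc.2 0 = 0 then
                if PySem.List.pyGetD info pc.2 0 = 0 then
                  traceT info edges fuel (s+1) w (PySem.List.pySetD v pc.2 1)
                else traceT info edges fuel s (w+1) (PySem.List.pySetD v pc.2 1)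
              else []
            else [])
          = (frontOf info edges v).flatMap (fun i =>
              if PySem.List.pyGetD info (PySem.List.pyGetD edges i ((0:Int),(0:Int))).2 0 = 0 then
                traceT info edges fuel (s+1) w (PySem.List.pySetD v (PySem.List.pyGetD edges i ((0:Int),(0:Int))).2 1)
              else traceT info edges fuel s (w+1) (PySem.List.pySetD v (PySem.List.pyGetD edges i ((0:Int),(0:Int))).2 1)) := by
        rw [flatMap_eq_pyRange edges ((0:Int),(0:Int))]
        have hcongr : ∀ i ∈ PySem.List.pyRange 0 edges.length 1,
            (if PySem.List.pyGetD v (PySem.List.pyGetD edges i ((0:Int),(0:Int))).1 0 ≠ 0 then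
              if PySem.List.pyGetD v (PySem.List.pyGetD edges i ((0:Int),(0:Int))).2 0 = 0 then
                if PySem.List.pyGetD info (PySem.List.pyGetD edges i ((0:Int),(0:Int))).2 0 = 0 then
                  traceT info edges fuel (s+1) w (PySem.List.pySetD v (PySem.List.pyGetD edges i ((0:Int),(0:Int))).2 1)
                else traceT info edges fuel s (w+1) (PySem.List.pySetD v (PySem.List.pyGetD edges i ((0:Int),(0:Int))).2 1)
              else []
            else [])
            = (if candb info edges v i then
                (if PySem.List.pyGetD info (PySem.List.pyGetD edges i ((0:Int),(0:Int))).2 0 = 0 then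
                  traceT info edges fuel (s+1) w (PySem.List.pySetD v (PySem.List.pyGetD edges i ((0:Int),(0:Int))).2 1)
                else traceT info edges fuel s (w+1) (PySem.List.pySetD v (PySem.List.pyGetD edges i ((0:Int),(0:Int))).2 1))
              else []) := by
          intro i _
          by_cases h1 : PySem.List.pyGetD v (PySem.List.pyGetD edges i ((0:Int),(0:Int))).1 0 ≠ 0 <;>
            by_cases h2 : PySem.List.pyGetD v (PySem.List.pyGetD edges i ((0:Int),(0:Int))).2 0 = 0 <;>
            simp [candb, h1, h2]
        rw [List.flatMap_congr hcongr, flatMap_if_filter]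
        rfl
      rw [hflat, foldl_max_flatMap]
      refine PySem.List.foldl_congr_mem _ _ _ _ ?_
      intro b i hi
      have hi' := hi
      rw [frontOf, List.mem_filter, PySem.List.mem_pyRange_one] at hi'
      obtain ⟨hj, hcand⟩ := hi'
      have hedge : PySem.List.pyGetD edges i ((0:Int),(0:Int)) = edges[i.toNat]'(by omega) :=
        PySem.List.pyGetD_eq_getElem edges _ hj.1 hj.2
      have hmem : PySem.List.pyGetD edges i ((0:Int),(0:Int)) ∈ edges := by
        rw [hedge]; exact List.getElem_mem _
      have hqp := snd_mem_pts edges hmem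
      have hvc : PySem.List.pyGetD v (PySem.List.pyGetD edges i ((0:Int),(0:Int))).2 0 = 0 := by
        simp [candb] at hcand; exact hcand.2
      rw [frontier_step info edges hn hb hinj v hv visS hvis _ hqp hvc]
      have hv' : (PySem.List.pySetD v (PySem.List.pyGetD edges i ((0:Int),(0:Int))).2 1).length = info.length := by
        rw [PySem.List.length_pySetD, hv]
      have hvis' := vis_step info edges hb hinj v hv visS hvis _ hqp
      split_ifs with hinfo
      · exact IH (s+1) w _ _ b hv' hvis'
      · exact IH s (w+1) _ _ b hv' hvis'
    · rw [if_pos (by omega), if_neg hsw, List.foldl_nil]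

-- ===== VERDICT (by name: the statement is the Claim_ definition above) =====
theorem solution_spec : Claim_equal_solution := by
  intro info edges _ hpre
  obtain ⟨hne, hb, hinj⟩ := hpre
  have hn : 0 < info.length := List.length_pos_iff.mpr hne
  have hN : (0:Int) < info.length := by exact_mod_cast hn
  simp only [Spec_solution, solution, solution_alt]
  rw [dfsA_eq_trace]
  have hv0len : (PySem.List.pySetD (List.replicate info.length (0:Int)) 0 1).length = info.length := by
    rw [PySem.List.length_pySetD, List.length_replicate]
  have hv0get : ∀ x ∈ PtsL edges,
      PySem.List.pyGetD (PySem.List.pySetD (List.replicate info.length (0:Int)) 0 1) x 0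
        = if x = 0 then 1 else 0 := by
    intro x hxp
    obtain ⟨h1, h2⟩ := hb x hxp
    have hmc : PySem.Int.mod x (List.replicate info.length (0:Int)).length
        = PySem.Int.mod 0 (List.replicate info.length (0:Int)).length ↔ x = 0 := by
      simp only [List.length_replicate]
      constructor
      · intro h; exact hinj _ hxp _ (zero_mem_pts edges) h
      · intro h; rw [h]
    have hgs := getset (List.replicate info.length (0:Int)) 0 x 1
      (by simp) (by simpa using hN) (by simpa using h1) (by simpa using h2) hmc
    rw [hgs]
    have hrep : PySem.List.pyGetD (List.replicate info.length (0:Int)) x 0 = 0 := by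
      rw [pyGetD_norm _ _ _ (by simpa using h1) (by simpa using h2)]
      simp only [List.getD_eq_getElem?_getD, List.getElem?_replicate]
      split_ifs <;> rfl
    rw [hrep]
  obtain ⟨L, hL⟩ : ∃ L, traceT info edges (info.length+1) 1 0
      (PySem.List.pySetD (List.replicate info.length (0:Int)) 0 1) = 1 :: L :=
    ⟨_, by rw [traceT, if_pos (by norm_num)]⟩
  have hvis0 : VisInv info edges (PySem.List.pySetD (List.replicate info.length (0:Int)) 0 1)
      (PySem.Set.ofList [(0:Int)]) := by
    have hsingle : ∀ u : Int, (PySem.Set.ofList [(0:Int)]).contains u = true ↔ u = 0 := by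
      intro u
      rw [PySem.Set.contains_iff]
      have h : (PySem.Set.ofList [(0:Int)] : List Int) = [0] := rfl
      rw [h, List.mem_singleton]
    constructor
    · intro u hu
      rw [hsingle u] at hu
      rw [hu]; exact zero_mem_pts edges
    · intro u hup
      rw [hsingle u, hv0get u hup]
      by_cases huc : u = 0
      · simp [huc]
      · simp [huc]
  have hinit : (PySem.List.pyGetD (altChildren info edges) 0 []).filter
        (fun i => !(PySem.Set.contains (PySem.Set.ofList [(0:Int)])
            (PySem.List.pyGetD edges i ((0:Int),(0:Int))).2))
      = frontOf info edges (PySem.List.pySetD (List.replicate info.length (0:Int)) 0 1) := by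
    rw [children_spec info edges hn hb hinj 0 (zero_mem_pts edges), List.filter_filter]
    refine List.filter_congr ?_
    intro j hj
    rw [PySem.List.mem_pyRange_one] at hj
    have hedge : PySem.List.pyGetD edges j ((0:Int),(0:Int)) = edges[j.toNat]'(by omega) :=
      PySem.List.pyGetD_eq_getElem edges _ hj.1 hj.2
    have hmem : PySem.List.pyGetD edges j ((0:Int),(0:Int)) ∈ edges := by
      rw [hedge]; exact List.getElem_mem _
    have hpp := fst_mem_pts edges hmem
    have hqp := snd_mem_pts edges hmem
    have hcontains : PySem.Set.contains (PySem.Set.ofList [(0:Int)])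
        (PySem.List.pyGetD edges j ((0:Int),(0:Int))).2
        = ((PySem.List.pyGetD edges j ((0:Int),(0:Int))).2 == 0) := by
      rw [Bool.eq_iff_iff, PySem.Set.contains_iff]
      have h : (PySem.Set.ofList [(0:Int)] : List Int) = [0] := rfl
      rw [h, List.mem_singleton]
      simp
    simp only [candb]
    rw [hv0get _ hpp, hv0get _ hqp, hcontains]
    by_cases hP : (PySem.List.pyGetD edges j ((0:Int),(0:Int))).1 = 0 <;>
      by_cases hC : (PySem.List.pyGetD edges j ((0:Int),(0:Int))).2 = 0 <;>
      simp [hP, hC]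
  rw [hinit, dfsB_eq_foldl_trace info edges hn hb hinj (info.length+1) 1 0 _ _ 0 hv0len hvis0]
  rw [hL]
  simp only [List.nil_append, PySem.List.max?_id_cons, Option.getD_some, List.foldl_cons]
  norm_num
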